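-- pv_equiv track=rewrite | github.com/wlabedz/int_oblicz_2 | aipython/air_cargo_heuristics.py | h_movement_cost
-- ===== SOURCE A (Python) =====
-- def h_movement_cost(state, goal):
--     """ Based on number of actions """
--     movement_cost = 0
--
--     for fact in goal:
--         #if cargo (object) which should be at the particular airport is not there
--         if goal[fact] is True and state.get(fact, False) is False and '_at_' in fact:
--             cargo, dest = fact.split("_at_")
--             if cargo.startswith("c"):
--                 current_loc = next((key.split('_at_')[1] for key, loc in state.items() if cargo in key and loc and '_at_' in key), None)
--
--                 #cargo is at the correct airport
--                 if current_loc == dest: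
--                     continue
--
--                 #cargo is at the wrong airport
--                 if current_loc:
--                     #is there any airport at the airport where parcel is located
--                     planes_on_wrong_airport = [key.split("_at_")[0] for key, loc in state.items() if "p" in key and state[key] and loc == current_loc]
--
--                     if planes_on_wrong_airport:
--                         #if the cargo is already placed in the airport we add two moves (flight and unload)
--                         if state.get(f"{cargo}_in_{planes_on_wrong_airport[0]}", False):
--                             movement_cost += 2
--                         #if it is not loaded then 3 moves
--                         else:
--                             movement_cost += 3
--
--                     # there is no plane at the airport where parcel is placed
--                     else:
--                         movement_cost += 4
--                 else:
--                     movement_cost += 4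
--
--     return movement_cost
-- ===== SOURCE B (Python) =====
-- def h_movement_cost(state, goal):
--     """ Based on number of actions """
--     # Precompute, in one pass over state, the placed facts ('_at_' keys that hold)
--     # together with their location; each goal fact then needs one scan of this
--     # (usually much smaller) list instead of re-filtering all of state twice.
--     candidates = [(k, k.split('_at_')[1]) for k, v in state.items() if v and '_at_' in k]
--     cost = 0
--     for fact, want in goal.items():
--         if want is True and state.get(fact, False) is False and '_at_' in fact:
--             cargo, dest = fact.split('_at_')
--             if cargo.startswith('c'):
--                 cur = next((loc for k, loc in candidates if cargo in k), None)
--                 if cur != dest: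
--                     cost += 4
--     return cost
-- ===== Notes on version B (the rewrite author's own statement) =====
-- stated objective: simpler
-- what changed: B builds the list of holding '_at_' state facts with their locations once up front and answers each goal fact with a single scan of that list and one comparison, dropping A's per-goal re-filtering of the whole state and its plane-counting branch, which is dead code because it compares a bool state value with a location string (always False) and therefore always adds 4.
import Mathlib
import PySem

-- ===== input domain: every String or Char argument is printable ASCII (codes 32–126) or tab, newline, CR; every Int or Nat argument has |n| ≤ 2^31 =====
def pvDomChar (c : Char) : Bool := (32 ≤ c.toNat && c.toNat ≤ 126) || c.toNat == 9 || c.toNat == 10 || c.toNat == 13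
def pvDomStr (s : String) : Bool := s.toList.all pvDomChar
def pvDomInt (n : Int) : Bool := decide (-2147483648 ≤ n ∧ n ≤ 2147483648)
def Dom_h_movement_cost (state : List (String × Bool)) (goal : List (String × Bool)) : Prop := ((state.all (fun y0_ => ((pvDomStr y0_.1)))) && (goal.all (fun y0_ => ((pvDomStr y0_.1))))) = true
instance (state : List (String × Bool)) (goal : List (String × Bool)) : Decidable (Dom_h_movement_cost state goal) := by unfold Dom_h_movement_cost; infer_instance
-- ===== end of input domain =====

-- B precomputes the holding '_at_' state facts with their locations once and answers each
-- goal fact with one scan of that list, dropping A's per-goal re-filtering of state and its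
-- dead plane branch (bool-vs-string comparison, always False). Equivalence of return values.

-- ===== PORT A =====
-- state.get(k, False) / goal[k]: first-match dict lookup (keys are unique under Pre_)
def pvStateGet (d : List (String × Bool)) (k : String) : Bool :=
  (PySem.Dict.mk d).getD k false

-- Python `loc == current_loc` compares a bool dict value with a str: always False in Python
def pvBoolEqStr (_ : Bool) (_ : List Char) : Bool := false

def h_movement_cost (state : List (String × Bool)) (goal : List (String × Bool)) : Int :=
  (goal.map Prod.fst).foldl (fun movement_cost fact =>
    if ((PySem.Dict.mk goal).getD fact false) == true
        && !(pvStateGet state fact)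
        && PySem.Chars.isIn "_at_".toList fact.toList then
      -- `cargo, dest = fact.split("_at_")`: Python raises ValueError unless exactly 2 parts
      -- (Pre_ excludes that); under Pre_ the trailing list is [] and the `_` branch is unreachable
      match PySem.Chars.splitOn fact.toList "_at_".toList with
      | cargo :: dest :: _ =>
        if PySem.Chars.startswith cargo "c".toList then
          let current_loc : Option (List Char) :=
            (state.find? (fun q => PySem.Chars.isIn cargo q.1.toList && q.2
                && PySem.Chars.isIn "_at_".toList q.1.toList)).map
              (fun q => PySem.List.pyGetD (PySem.Chars.splitOn q.1.toList "_at_".toList) 1 [])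
          if current_loc == some dest then movement_cost
          else if (match current_loc with | some l => !l.isEmpty | none => false) then
            let planes : List (List Char) :=
              state.filterMap (fun q =>
                if PySem.Chars.isIn "p".toList q.1.toList && pvStateGet state q.1
                    && pvBoolEqStr q.2 (current_loc.getD []) then
                  some (PySem.List.pyGetD (PySem.Chars.splitOn q.1.toList "_at_".toList) 0 [])
                else none)
            match planes with
            | p0 :: _ =>
              if pvStateGet state (String.ofList (cargo ++ "_in_".toList ++ p0)) then movement_cost + 2
              else movement_cost + 3
            | [] => movement_cost + 4
          else movement_cost + 4
        else movement_cost
      | _ => movement_cost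
    else movement_cost) 0

-- ===== PORT B =====
-- state.get(k, False): first-match dict lookup (B-side, written over the raw list)
def pvStateGetB (d : List (String × Bool)) (k : String) : Bool :=
  ((d.find? (fun q => q.1 == k)).map Prod.snd).getD false

def h_movement_cost_alt (state : List (String × Bool)) (goal : List (String × Bool)) : Int :=
  let candidates : List (String × List Char) :=
    state.filterMap (fun q =>
      if q.2 && PySem.Chars.isIn "_at_".toList q.1.toList then
        some (q.1, PySem.List.pyGetD (PySem.Chars.splitOn q.1.toList "_at_".toList) 1 [])
      else none)
  goal.foldl (fun cost p =>
    if p.2 && !(pvStateGetB state p.1)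
        && PySem.Chars.isIn "_at_".toList p.1.toList then
      -- `cargo, dest = fact.split("_at_")`: exactly two pieces (else Python raises, outside Pre_)
      let parts := PySem.Chars.splitOn p.1.toList "_at_".toList
      if parts.length == 2 then
        let cargo := PySem.List.pyGetD parts 0 []
        let dest := PySem.List.pyGetD parts 1 []
        if PySem.Chars.startswith cargo "c".toList then
          let cur := (candidates.find? (fun c => PySem.Chars.isIn cargo c.1.toList)).map Prod.snd
          if cur == some dest then cost else cost + 4
        else cost
      else cost
    else cost) 0

-- ===== PRECONDITION & SPEC =====
-- Pre_ excludes (a) assoc lists with duplicate keys, which represent no Python dict, and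
-- (b) goal facts reached by A whose key contains '_at_' more than once, where A's
-- `cargo, dest = fact.split("_at_")` raises ValueError.
def Pre_h_movement_cost (state : List (String × Bool)) (goal : List (String × Bool)) : Prop :=
  (state.map Prod.fst).Nodup ∧ (goal.map Prod.fst).Nodup ∧
  ∀ p ∈ goal, p.2 = true → (PySem.Dict.mk state).getD p.1 false = false →
    (PySem.Chars.splitOn p.1.toList "_at_".toList).length ≤ 2
instance (state : List (String × Bool)) (goal : List (String × Bool)) : Decidable (Pre_h_movement_cost state goal) := by unfold Pre_h_movement_cost; infer_instance

def pvWitness_h_movement_cost : (List (String × Bool)) × (List (String × Bool)) :=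
  ([("c1_at_A", true), ("p1_at_A", true), ("c1_in_p1", false)], [("c1_at_B", true), ("p1_at_B", true)])

def Spec_h_movement_cost (state : List (String × Bool)) (goal : List (String × Bool)) (out : Int) : Prop := out = h_movement_cost_alt state goal
instance (state : List (String × Bool)) (goal : List (String × Bool)) (out : Int) : Decidable (Spec_h_movement_cost state goal out) := by unfold Spec_h_movement_cost; infer_instance

-- ===== CLAIM (what is proved, stated in full; the proofs are below) =====
def Claim_equal_h_movement_cost : Prop := ∀ (state : List (String × Bool)) (goal : List (String × Bool)), Dom_h_movement_cost state goal → Pre_h_movement_cost state goal → Spec_h_movement_cost state goal (h_movement_cost state goal)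

-- ===== LEMMAS AND PROOFS =====

-- B's one-pass candidate index, found-first, equals A's per-fact scan of state
lemma pv_find_cand (cargo : List Char) (state : List (String × Bool)) :
    ((state.filterMap (fun q =>
        if q.2 && PySem.Chars.isIn "_at_".toList q.1.toList then
          some (q.1, PySem.List.pyGetD (PySem.Chars.splitOn q.1.toList "_at_".toList) 1 [])
        else none)).find? (fun c => PySem.Chars.isIn cargo c.1.toList)).map Prod.snd
    = (state.find? (fun q => PySem.Chars.isIn cargo q.1.toList && q.2
          && PySem.Chars.isIn "_at_".toList q.1.toList)).map
        (fun q => PySem.List.pyGetD (PySem.Chars.splitOn q.1.toList "_at_".toList) 1 []) := by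
  induction state with
  | nil => rfl
  | cons q rest ih =>
    rw [List.filterMap_cons]
    by_cases h : (q.2 && PySem.Chars.isIn "_at_".toList q.1.toList) = true
    · rw [if_pos h]
      by_cases hc : PySem.Chars.isIn cargo q.1.toList = true
      · rw [List.find?_cons_of_pos (by simpa using hc),
            List.find?_cons_of_pos (by simp only [Bool.and_eq_true] at h ⊢; exact ⟨⟨hc, h.1⟩, h.2⟩)]
        rfl
      · rw [List.find?_cons_of_neg (by simpa using hc),
            List.find?_cons_of_neg (by simp [hc]), ih]
    · rw [if_neg h]
      rw [List.find?_cons_of_neg (by simp_all), ih]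

-- A's plane comprehension is empty: its bool-vs-string comparison is always False
lemma pv_planes_nil (state : List (String × Bool)) (cl : List Char) :
    state.filterMap (fun q =>
      if PySem.Chars.isIn "p".toList q.1.toList && pvStateGet state q.1
          && pvBoolEqStr q.2 cl then
        some (PySem.List.pyGetD (PySem.Chars.splitOn q.1.toList "_at_".toList) 0 [])
      else none) = [] := by
  simp [pvBoolEqStr]

-- B's raw-list lookup is A's dict lookup
lemma pv_stateGetB_eq (d : List (String × Bool)) (k : String) :
    pvStateGetB d k = pvStateGet d k := by
  simp [pvStateGetB, pvStateGet, PySem.Dict.getD, PySem.Dict.get?]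

-- iterating a nodup-keyed dict's keys and looking each key up yields the stored value
lemma pv_goal_lookup (goal : List (String × Bool)) (hn : (goal.map Prod.fst).Nodup)
    (p : String × Bool) (hp : p ∈ goal) :
    (PySem.Dict.mk goal).getD p.1 false = p.2 := by
  have h := PySem.Dict.get?_of_mem_items (d := PySem.Dict.mk goal) (k := p.1) (v := p.2) hp hn
  simp [PySem.Dict.getD_eq_get?_getD, h]

-- ===== VERDICT (by name: the statement is the Claim_ definition above) =====
theorem h_movement_cost_spec : Claim_equal_h_movement_cost := by
  intro state goal _hdom hpre
  unfold Spec_h_movement_cost h_movement_cost h_movement_cost_alt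
  rw [List.foldl_map]
  apply PySem.List.foldl_congr_mem
  intro cost p hp
  rw [pv_goal_lookup goal hpre.2.1 p hp]
  cases hv : p.2 with
  | false => simp
  | true =>
    simp only [show (true == true) = true from rfl, Bool.true_and, pv_stateGetB_eq]
    by_cases hcond : (!pvStateGet state p.1 && PySem.Chars.isIn "_at_".toList p.1.toList) = true
    · rw [if_pos hcond, if_pos hcond]
      have hget : (PySem.Dict.mk state).getD p.1 false = false := by
        have h1 := (Bool.and_eq_true _ _).mp hcond |>.1
        simpa [pvStateGet] using (Bool.not_eq_true' _).mp h1
      have hlen := hpre.2.2 p hp hv hget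
      cases hs : PySem.Chars.splitOn p.1.toList "_at_".toList with
      | nil => rfl
      | cons cargo tl =>
        cases tl with
        | nil => rfl
        | cons dest rest =>
          have hrest : rest = [] := by
            rw [hs] at hlen
            simpa using hlen
          subst hrest
          have e2 : ((([cargo, dest] : List (List Char)).length == 2)) = true := rfl
          have e0 : PySem.List.pyGetD [cargo, dest] 0 ([] : List Char) = cargo := rfl
          have e1 : PySem.List.pyGetD [cargo, dest] 1 ([] : List Char) = dest := rfl
          simp only [e2, if_true, e0, e1]
          by_cases hst : PySem.Chars.startswith cargo "c".toList = true
          · rw [if_pos hst, if_pos hst, pv_find_cand, pv_planes_nil]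
            cases hfind : (state.find? (fun q => PySem.Chars.isIn cargo q.1.toList && q.2
                && PySem.Chars.isIn "_at_".toList q.1.toList)).map
                (fun q => PySem.List.pyGetD (PySem.Chars.splitOn q.1.toList "_at_".toList) 1 []) with
            | none => simp
            | some cl => by_cases hd : cl = dest <;> simp [hd]
          · rw [if_neg hst, if_neg hst]
    · rw [if_neg hcond, if_neg hcond]
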